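-- pv_equiv track=rewrite | github.com/Azizbek201798/HomeWorks_NajotTa-lim | Month_4/Real_Interfaces.py/homework/codeWars_Medium_2.py | remove_smallest
-- ===== SOURCE A (Python) =====
-- def remove_smallest(n, arr):
--     if n <= 0:
--         return arr
--     if n >= len(arr):
--         return []
--
--     # Tayyor saralash methodi.
--     sorted_arr = sorted(arr)
--     for _ in range(n):
--         min_val = sorted_arr[0]
--         arr.remove(min_val)
--         sorted_arr.remove(min_val)
--
--     return arr
-- ===== SOURCE B (Python) =====
-- def remove_smallest(n, arr):
--     # One pass with a multiplicity budget instead of repeated list.remove scans.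
--     # (A mutates arr in place; B leaves it untouched - return value is identical.)
--     if n <= 0:
--         return arr
--     if n >= len(arr):
--         return []
--     cnt = {}
--     for v in sorted(arr)[:n]:
--         cnt[v] = cnt.get(v, 0) + 1
--     out = []
--     for v in arr:
--         if cnt.get(v, 0) > 0:
--             cnt[v] = cnt[v] - 1
--         else:
--             out.append(v)
--     return out
-- ===== Notes on version B (the rewrite author's own statement) =====
-- stated objective: faster
-- what changed: Instead of calling list.remove n times (each a linear scan that shifts elements), B builds a dict of how many copies of each of the n smallest values to drop and rebuilds the list in one pass.
import Mathlib
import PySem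

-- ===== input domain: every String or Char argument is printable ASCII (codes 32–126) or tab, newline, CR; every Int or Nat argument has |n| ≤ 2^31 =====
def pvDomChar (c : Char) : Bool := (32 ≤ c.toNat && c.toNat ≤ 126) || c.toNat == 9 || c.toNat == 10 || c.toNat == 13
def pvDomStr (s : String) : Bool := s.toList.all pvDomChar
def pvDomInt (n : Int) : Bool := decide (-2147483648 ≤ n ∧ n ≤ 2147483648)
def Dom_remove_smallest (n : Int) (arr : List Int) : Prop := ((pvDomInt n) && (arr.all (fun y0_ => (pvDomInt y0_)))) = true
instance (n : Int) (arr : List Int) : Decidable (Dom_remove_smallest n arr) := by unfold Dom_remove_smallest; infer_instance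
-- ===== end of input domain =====

-- B replaces A's n repeated list.remove scans by one counting dict and a single rebuild pass
-- (faster; A mutates arr in place while B does not — the equivalence is about the return value).

-- ===== PORT A =====
-- one iteration of A's `for _ in range(n)` body over the state (arr, sorted_arr);
-- `sorted_arr[0]` is pyGet? (none = IndexError, never reached since A guards n < len(arr))
def removeStepA (st : List Int × List Int) : List Int × List Int :=
  match PySem.List.pyGet? st.2 0 with
  | none => st
  | some min_val =>
      ((PySem.List.remove? st.1 min_val).getD st.1,
       (PySem.List.remove? st.2 min_val).getD st.2)

def remove_smallest (n : Int) (arr : List Int) : List Int :=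
  if n ≤ 0 then arr
  else if n ≥ (arr.length : Int) then []
  else
    let sorted_arr := PySem.List.sorted arr (fun x => x)
    ((PySem.List.pyRange 0 n 1).foldl (fun st _ => removeStepA st) (arr, sorted_arr)).1

-- ===== PORT B =====
def remove_smallest_alt (n : Int) (arr : List Int) : List Int :=
  if n ≤ 0 then arr
  else if n ≥ (arr.length : Int) then []
  else
    let cnt : PySem.Dict Int Int :=
      (PySem.List.slice (PySem.List.sorted arr (fun x => x)) none (some n)).foldl
        (fun d v => d.insert v (d.getD v 0 + 1)) PySem.Dict.empty
    (arr.foldl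
      (fun (st : PySem.Dict Int Int × List Int) v =>
        if st.1.getD v 0 > 0 then (st.1.insert v (st.1.getD v 0 - 1), st.2)
        else (st.1, st.2 ++ [v]))
      (cnt, ([] : List Int))).2

-- ===== PRECONDITION & SPEC =====
def Spec_remove_smallest (n : Int) (arr : List Int) (out : List Int) : Prop := out = remove_smallest_alt n arr
instance (n : Int) (arr : List Int) (out : List Int) : Decidable (Spec_remove_smallest n arr out) := by unfold Spec_remove_smallest; infer_instance

-- ===== CLAIM (what is proved, stated in full; the proofs are below) =====
def Claim_equal_remove_smallest : Prop := ∀ (n : Int) (arr : List Int), Dom_remove_smallest n arr → Spec_remove_smallest n arr (remove_smallest n arr)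

-- ===== LEMMAS AND PROOFS =====

-- count after erasing the first occurrence, in subtraction form
theorem count_erase_sub (xs : List Int) (m v : Int) :
    (xs.erase m).count v = xs.count v - (if v = m then 1 else 0) := by
  rw [List.count_erase]
  by_cases h : v = m
  · subst h; simp
  · simp [beq_iff_eq, h, Ne.symm h]

theorem count_cons_add (m v : Int) (t : List Int) :
    (m :: t).count v = t.count v + (if v = m then 1 else 0) := by
  rw [List.count_cons]
  by_cases h : v = m
  · subst h; simp
  · simp [beq_iff_eq, h, Ne.symm h]

-- the multiplicity hypothesis survives one erase step
theorem hsub_erase {xs t : List Int} {m : Int}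
    (hsub : ∀ v, (m :: t).count v ≤ xs.count v) :
    ∀ v, t.count v ≤ (xs.erase m).count v := by
  intro v
  have h1 := hsub v
  rw [count_cons_add] at h1
  rw [count_erase_sub]
  by_cases hv : v = m <;> simp [hv] at h1 ⊢ <;> omega

theorem mem_of_hsub {xs t : List Int} {m : Int}
    (hsub : ∀ v, (m :: t).count v ≤ xs.count v) : m ∈ xs := by
  have := hsub m
  rw [count_cons_add] at this
  simp at this
  exact List.count_pos_iff.mp (by omega)

-- a foldl whose body ignores the list element is an iterate
theorem foldl_ignore_eq_iterate {α β : Type} (f : α → α) (l : List β) (init : α) :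
    l.foldl (fun st _ => f st) init = f^[l.length] init := by
  induction l generalizing init with
  | nil => rfl
  | cons x xs ih => simp [List.foldl, ih, Function.iterate_succ_apply]

-- A's loop: k iterations peel the first k sorted values and erase each (first occurrence) from arr
theorem iterate_removeStepA (k : Nat) :
    ∀ (a s : List Int), (∀ v, s.count v ≤ a.count v) →
    removeStepA^[k] (a, s) = ((s.take k).foldl List.erase a, s.drop k) := by
  induction k with
  | zero => intro a s _; simp
  | succ k ih =>
      intro a s hsub
      cases s with
      | nil =>
          have hfix : removeStepA (a, ([] : List Int)) = (a, []) := by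
            simp [removeStepA, PySem.List.pyGet?, PySem.List.pyIdx?]
          rw [Function.iterate_succ_apply, hfix,
              ih a [] (fun v => by simp)]
          simp
      | cons m t =>
          have hm : m ∈ a := mem_of_hsub hsub
          have hstep : removeStepA (a, m :: t) = (a.erase m, t) := by
            simp [removeStepA, PySem.List.pyGet?, PySem.List.pyIdx?,
              PySem.List.remove?_eq_some_erase a m hm, PySem.List.remove?_cons_self]
          rw [Function.iterate_succ_apply, hstep, ih (a.erase m) t (hsub_erase hsub)]
          simp

-- the pure model of B's rebuild pass: keep v unless its budget c v is still positive
def passF : List Int → (Int → Int) → List Int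
  | [], _ => []
  | x :: xs, c =>
      if c x > 0 then passF xs (fun v => if v = x then c x - 1 else c v)
      else x :: passF xs (c)

theorem passF_cons_pos (x : Int) (xs : List Int) (c : Int → Int) (h : c x > 0) :
    passF (x :: xs) c = passF xs (fun v => if v = x then c x - 1 else c v) := by
  simp [passF, h]

theorem passF_cons_neg (x : Int) (xs : List Int) (c : Int → Int) (h : ¬ c x > 0) :
    passF (x :: xs) c = x :: passF xs c := by
  simp [passF, h]

-- B's fold computes passF of the dict's getD-view
theorem foldl_pass_eq_passF (xs : List Int) :
    ∀ (d : PySem.Dict Int Int) (out : List Int),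
    (xs.foldl
      (fun (st : PySem.Dict Int Int × List Int) v =>
        if st.1.getD v 0 > 0 then (st.1.insert v (st.1.getD v 0 - 1), st.2)
        else (st.1, st.2 ++ [v]))
      (d, out)).2 = out ++ passF xs (fun v => d.getD v 0) := by
  induction xs with
  | nil => intro d out; simp [passF]
  | cons x xs ih =>
      intro d out
      by_cases h : d.getD x 0 > 0
      · rw [List.foldl_cons, if_pos h, ih,
            passF_cons_pos x xs _ h]
        congr 1
        congr 1
        funext v
        rw [PySem.Dict.getD_insert]
      · rw [List.foldl_cons, if_neg h, ih,
            passF_cons_neg x xs _ h]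
        simp

theorem passF_zero_budget (xs : List Int) (c : Int → Int) (h : ∀ v, c v ≤ 0) :
    passF xs c = xs := by
  induction xs with
  | nil => rfl
  | cons x xs ih =>
      rw [passF_cons_neg x xs c (by have := h x; omega), ih]

-- bumping the budget of m by one = first erasing the first occurrence of m
theorem passF_bump (xs : List Int) :
    ∀ (c : Int → Int) (m : Int), m ∈ xs → (∀ v, 0 ≤ c v) →
    passF xs (fun v => c v + if v = m then 1 else 0) = passF (xs.erase m) c := by
  induction xs with
  | nil => intro c m hm; exact absurd hm (by simp)
  | cons x xs ih =>
      intro c m hm hpos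
      by_cases hxm : x = m
      · subst hxm
        have hcond : (fun v => c v + if v = x then 1 else 0) x > 0 := by
          have := hpos x; simp; omega
        rw [passF_cons_pos x xs _ hcond, List.erase_cons_head]
        congr 1
        funext v
        by_cases hv : v = x <;> simp [hv]
      · have hm' : m ∈ xs := by
          rcases List.mem_cons.mp hm with h | h
          · exact absurd h.symm hxm
          · exact h
        have herase : (x :: xs).erase m = x :: xs.erase m :=
          List.erase_cons_tail (by simpa using hxm)
        by_cases h : c x > 0
        · have hcond : (fun v => c v + if v = m then 1 else 0) x > 0 := by
            simp [hxm]; omega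
          rw [passF_cons_pos x xs _ hcond, herase, passF_cons_pos x (xs.erase m) c h]
          have hfun : (fun v => if v = x then (fun v => c v + if v = m then 1 else 0) x - 1
                else c v + if v = m then 1 else 0)
              = (fun v => (if v = x then c x - 1 else c v) + if v = m then 1 else 0) := by
            funext v
            by_cases hv : v = x <;> simp [hv, hxm]
          rw [hfun, ih _ m hm'
            (fun v => by by_cases hv : v = x <;> simp [hv] <;> [omega; exact hpos v])]
        · have hcond : ¬ (fun v => c v + if v = m then 1 else 0) x > 0 := by
            simp [hxm]; omega
          rw [passF_cons_neg x xs _ hcond, herase, passF_cons_neg x (xs.erase m) c h,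
              ih c m hm' hpos]

-- spending the budget Counter(ms) = erasing the first occurrence of each element of ms
theorem passF_count (ms : List Int) :
    ∀ (xs : List Int), (∀ v, ms.count v ≤ xs.count v) →
    passF xs (fun v => (ms.count v : Int)) = ms.foldl List.erase xs := by
  induction ms with
  | nil => intro xs _; simpa using passF_zero_budget xs _ (fun v => by simp)
  | cons m t ih =>
      intro xs hsub
      have hm : m ∈ xs := mem_of_hsub hsub
      have hfun : (fun v => (((m :: t).count v : Nat) : Int))
          = (fun v => (t.count v : Int) + if v = m then 1 else 0) := by
        funext v
        rw [count_cons_add]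
        by_cases hv : v = m <;> simp [hv]
      rw [hfun, passF_bump xs _ m hm (fun v => by positivity),
          ih (xs.erase m) (fun v => hsub_erase hsub v)]
      simp [List.foldl]

-- ===== VERDICT (by name: the statement is the Claim_ definition above) =====
theorem remove_smallest_spec : Claim_equal_remove_smallest := by
  intro n arr _
  unfold Spec_remove_smallest remove_smallest remove_smallest_alt
  by_cases h1 : n ≤ 0
  · simp [h1]
  · by_cases h2 : n ≥ (arr.length : Int)
    · simp [h1, h2]
    · simp only [if_neg h1, if_neg h2]
      set s := PySem.List.sorted arr (fun x => x) with hs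
      have hperm : s.Perm arr := PySem.List.sorted_perm arr (fun x => x) false
      have hcount : ∀ v, s.count v ≤ arr.count v := fun v => (hperm.count_eq v).le
      -- A side
      rw [foldl_ignore_eq_iterate, PySem.List.length_pyRange_one,
          iterate_removeStepA _ arr s hcount]
      -- B side
      have hn0 : (0:Int) ≤ n := by omega
      rw [PySem.List.slice_to _ hn0, PySem.Dict.foldl_insert_getD_add_one_eq_counter,
          foldl_pass_eq_passF]
      have hview : (fun v => (PySem.Dict.counter (s.take n.toNat)).getD v 0)
          = (fun v => ((s.take n.toNat).count v : Int)) := by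
        funext v; exact PySem.Dict.getD_counter _ v
      rw [hview, passF_count _ arr
        (fun v => le_trans (List.Sublist.count_le v (List.take_sublist _ _)) (hcount v))]
      simp
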